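-- pv_equiv track=rewrite | github.com/BSanandu88/Coding-questions | week_8/gpa5.py | trending
-- ===== SOURCE A (Python) =====
-- def trending(subject_topics):
--     common_topics = set(subject_topics[0])
--     for topics in subject_topics:
--         common_topics = common_topics.union(set(topics))
--     common_topics_list = list(common_topics)
--     common_topics_count = {}
--     for topic in common_topics_list:
--         common_topics_count[topic] = 0
--         for topics in subject_topics:
--             if topic in topics:
--                 common_topics_count[topic] += 1
--     top_count = max(common_topics_count.values())
--     top_topics = []
--     for key,value in common_topics_count.items():
--         if value == top_count:
--             top_topics.append(key)
--
--     bottom_count = min(common_topics_count.values())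
--     bottom_topics = []
--     for key,value in common_topics_count.items():
--         if value == bottom_count:
--             bottom_topics.append(key)
--     return len(top_topics),len(bottom_topics)
-- ===== SOURCE B (Python) =====
-- def trending(subject_topics):
--     freq = {}
--     for topics in subject_topics:
--         for t in set(topics):
--             freq[t] = freq.get(t, 0) + 1
--     hist = {}
--     for v in freq.values():
--         hist[v] = hist.get(v, 0) + 1
--     return hist[max(hist)], hist[min(hist)]
-- ===== Notes on version B (the rewrite author's own statement) =====
-- stated objective: faster
-- what changed: Replaces A's per-distinct-topic rescan of every subject list and its two tie-counting passes over the count dict by a single pass building a topic-frequency dict, then a histogram of frequencies, so the answer is two lookups hist[max(hist)], hist[min(hist)]; intended as asymptotically faster when there are many distinct topics (a timing run measured up to ~500x on random/rev input families, ~1.2x on constant-content inputs where both are linear).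
import Mathlib
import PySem

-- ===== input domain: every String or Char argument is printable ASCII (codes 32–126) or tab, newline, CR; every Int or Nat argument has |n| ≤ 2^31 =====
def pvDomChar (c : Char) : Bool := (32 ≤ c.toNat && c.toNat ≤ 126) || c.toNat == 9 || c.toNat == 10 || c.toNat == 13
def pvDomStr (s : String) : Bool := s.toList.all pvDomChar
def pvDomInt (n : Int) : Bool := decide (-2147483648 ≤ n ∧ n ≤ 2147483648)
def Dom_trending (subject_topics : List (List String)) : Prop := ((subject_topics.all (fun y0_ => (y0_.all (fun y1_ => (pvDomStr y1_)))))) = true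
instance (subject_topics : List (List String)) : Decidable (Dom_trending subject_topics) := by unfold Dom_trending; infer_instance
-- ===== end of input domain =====

-- B replaces A's per-distinct-topic rescans of all subject lists and the two tie-counting passes
-- by one frequency dict built in a single pass plus a histogram of frequencies, answered by two
-- lookups (objective: faster — intended as asymptotically faster when topics are many and distinct;
-- a timing run measured up to ~500x on random inputs, ~1.2x on constant-content inputs).

-- ===== PORT A =====
def trending (subject_topics : List (List String)) : Int × Int :=
  match PySem.List.pyGet? subject_topics 0 with
  | none => (0, 0)  -- IndexError: subject_topics[0] on empty input (outside Pre_)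
  | some first =>
    let common_topics : PySem.Set String :=
      subject_topics.foldl (fun s topics => s.union (PySem.Set.ofList topics))
        (PySem.Set.ofList first)
    let common_topics_count : PySem.Dict String Int :=
      common_topics.foldl (fun d topic =>
        subject_topics.foldl
          (fun d topics => if topic ∈ topics then d.insert topic (d.getD topic 0 + 1) else d)
          (d.insert topic 0)) PySem.Dict.empty
    match PySem.List.max? common_topics_count.values (fun v => v) with
    | none => (0, 0)  -- ValueError: max() of empty values (outside Pre_)
    | some top_count =>
      let top_topics : List String :=
        common_topics_count.items.foldl
          (fun acc kv => if kv.2 = top_count then acc ++ [kv.1] else acc) []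
      match PySem.List.min? common_topics_count.values (fun v => v) with
      | none => (0, 0)
      | some bottom_count =>
        let bottom_topics : List String :=
          common_topics_count.items.foldl
            (fun acc kv => if kv.2 = bottom_count then acc ++ [kv.1] else acc) []
        ((top_topics.length : Int), (bottom_topics.length : Int))

-- ===== PORT B =====
def trending_alt (subject_topics : List (List String)) : Int × Int :=
  let freq : PySem.Dict String Int :=
    subject_topics.foldl (fun d topics =>
      (PySem.Set.ofList topics).foldl (fun d t => d.insert t (d.getD t 0 + 1)) d)
      PySem.Dict.empty
  let hist : PySem.Dict Int Int :=
    freq.values.foldl (fun h v => h.insert v (h.getD v 0 + 1)) PySem.Dict.empty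
  match PySem.List.max? hist.keys (fun v => v), PySem.List.min? hist.keys (fun v => v) with
  | some mx, some mn => (hist.getD mx 0, hist.getD mn 0)  -- keys are present: hist[max(hist)], hist[min(hist)]
  | _, _ => (0, 0)  -- ValueError: max() of empty dict (outside Pre_)

-- ===== PRECONDITION & SPEC =====
-- Pre_ excludes exactly the inputs where A raises: an empty list (IndexError on subject_topics[0])
-- or one whose subject lists are all empty (ValueError from max() of an empty dict); B raises there too.
def Pre_trending (subject_topics : List (List String)) : Prop := subject_topics.flatten ≠ []
instance (subject_topics : List (List String)) : Decidable (Pre_trending subject_topics) := by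
  unfold Pre_trending; infer_instance
def pvWitness_trending : List (List String) := [["a", "b"], ["b"]]
def Spec_trending (subject_topics : List (List String)) (out : Int × Int) : Prop := out = trending_alt subject_topics
instance (subject_topics : List (List String)) (out : Int × Int) : Decidable (Spec_trending subject_topics out) := by unfold Spec_trending; infer_instance

-- ===== CLAIM (what is proved, stated in full; the proofs are below) =====
def Claim_equal_trending : Prop := ∀ (subject_topics : List (List String)), Dom_trending subject_topics → Pre_trending subject_topics → Spec_trending subject_topics (trending subject_topics)

-- ===== LEMMAS AND PROOFS =====

-- number of subject lists that contain topic t (the value both count dicts assign to t)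
def pvNC (sts : List (List String)) (t : String) : Int :=
  ((sts.countP (fun ts => decide (t ∈ ts)) : Nat) : Int)

theorem pvNC_cons (ts : List String) (l : List (List String)) (t : String) :
    pvNC (ts :: l) t = (if t ∈ ts then 1 else 0) + pvNC l t := by
  simp only [pvNC, List.countP_cons]
  by_cases h : t ∈ ts
  · simp [h]; omega
  · simp [h]

-- A's inner loop over subject_topics starting from d.insert topic v just adds pvNC
theorem inner_eq (topic : String) (l : List (List String)) :
    ∀ (d : PySem.Dict String Int) (v : Int),
      l.foldl (fun d topics => if topic ∈ topics then d.insert topic (d.getD topic 0 + 1) else d)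
        (d.insert topic v) = d.insert topic (v + pvNC l topic) := by
  induction l with
  | nil => intro d v; simp [pvNC]
  | cons ts l ih =>
    intro d v
    simp only [List.foldl_cons, pvNC_cons]
    by_cases h : topic ∈ ts
    · simp only [h, if_pos]
      rw [PySem.Dict.getD_insert_self, PySem.Dict.insert_insert_self, ih]
      ring_nf
    · simp only [h, if_neg, ih, not_false_iff]
      ring_nf

-- A's count dict: items are exactly the union-set keys paired with pvNC
theorem countsA_items (sts : List (List String)) (K : List String) (hK : K.Nodup) :
    (K.foldl (fun d topic =>
        sts.foldl (fun d topics => if topic ∈ topics then d.insert topic (d.getD topic 0 + 1) else d)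
          (d.insert topic 0)) PySem.Dict.empty).items
      = K.map (fun t => (t, pvNC sts t)) := by
  have hfun : (fun (d : PySem.Dict String Int) topic =>
      sts.foldl (fun d topics => if topic ∈ topics then d.insert topic (d.getD topic 0 + 1) else d)
        (d.insert topic 0)) = fun d topic => d.insert topic (0 + pvNC sts topic) := by
    funext d topic; exact inner_eq topic sts d 0
  rw [hfun]
  have := PySem.Dict.items_foldl_insert_fresh (l := K) (k := fun t => t)
    (v := fun t => 0 + pvNC sts t) (d := PySem.Dict.empty)
    (by intro a _; exact PySem.Dict.contains_empty _) (by simpa using hK)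
  simpa [zero_add] using this

-- membership in A's union fold
theorem mem_unionFold (l : List (List String)) :
    ∀ (s : PySem.Set String) (t : String),
      t ∈ l.foldl (fun s topics => s.union (PySem.Set.ofList topics)) s ↔
        t ∈ s ∨ ∃ ts ∈ l, t ∈ ts := by
  induction l with
  | nil => intro s t; simp
  | cons ts l ih =>
    intro s t
    simp only [List.foldl_cons, ih, PySem.Set.mem_union, PySem.Set.mem_ofList]
    constructor
    · rintro ((h | h) | ⟨u, hu, ht⟩)
      · exact Or.inl h
      · exact Or.inr ⟨ts, by simp, h⟩
      · exact Or.inr ⟨u, by simp [hu], ht⟩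
    · rintro (h | ⟨u, hu, ht⟩)
      · exact Or.inl (Or.inl h)
      · rcases List.mem_cons.mp hu with rfl | hu
        · exact Or.inl (Or.inr ht)
        · exact Or.inr ⟨u, hu, ht⟩

theorem nodup_unionFold (l : List (List String)) :
    ∀ (s : PySem.Set String), s.Nodup →
      (l.foldl (fun s topics => s.union (PySem.Set.ofList topics)) s).Nodup := by
  induction l with
  | nil => intro s hs; simpa using hs
  | cons ts l ih =>
    intro s hs
    exact ih _ (PySem.Set.nodup_union _ _ hs)

-- B's freq dict: getD is pvNC, keys have the right membership and are nodup
theorem freqB_getD (l : List (List String)) :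
    ∀ (d : PySem.Dict String Int) (t : String),
      (l.foldl (fun d topics =>
          (PySem.Set.ofList topics).foldl (fun d x => d.insert x (d.getD x 0 + 1)) d) d).getD t 0
        = d.getD t 0 + pvNC l t := by
  induction l with
  | nil => intro d t; simp [pvNC]
  | cons ts l ih =>
    intro d t
    simp only [List.foldl_cons, ih, pvNC_cons]
    rw [PySem.Dict.getD_foldl_insert_add_one]
    have hc : (List.count t (PySem.Set.ofList ts) : Int) = if t ∈ ts then 1 else 0 := by
      by_cases h : t ∈ ts
      · have : List.count t (PySem.Set.ofList ts) = 1 :=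
          List.count_eq_one_of_mem (PySem.Set.nodup_ofList ts) ((PySem.Set.mem_ofList ts t).mpr h)
        simp [h]
      · have : List.count t (PySem.Set.ofList ts) = 0 :=
          List.count_eq_zero.mpr (fun hm => h ((PySem.Set.mem_ofList ts t).mp hm))
        simp [this, h]
    rw [hc]; ring
theorem freqB_keys (l : List (List String)) :
    ∀ (d : PySem.Dict String Int),
      (l.foldl (fun d topics =>
          (PySem.Set.ofList topics).foldl (fun d x => d.insert x (d.getD x 0 + 1)) d) d).keys
        = l.foldl (fun s topics => PySem.Set.update s (PySem.Set.ofList topics)) d.keys := by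
  induction l with
  | nil => intro d; rfl
  | cons ts l ih =>
    intro d
    simp only [List.foldl_cons, ih, PySem.Dict.keys_foldl_insert]

theorem mem_updateFold (l : List (List String)) :
    ∀ (s : PySem.Set String) (t : String),
      t ∈ l.foldl (fun s topics => PySem.Set.update s (PySem.Set.ofList topics)) s ↔
        t ∈ s ∨ ∃ ts ∈ l, t ∈ ts := by
  induction l with
  | nil => intro s t; simp
  | cons ts l ih =>
    intro s t
    simp only [List.foldl_cons, ih, PySem.Set.mem_update, PySem.Set.mem_ofList]
    constructor
    · rintro ((h | h) | ⟨u, hu, ht⟩)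
      · exact Or.inl h
      · exact Or.inr ⟨ts, by simp, h⟩
      · exact Or.inr ⟨u, by simp [hu], ht⟩
    · rintro (h | ⟨u, hu, ht⟩)
      · exact Or.inl (Or.inl h)
      · rcases List.mem_cons.mp hu with rfl | hu
        · exact Or.inl (Or.inr ht)
        · exact Or.inr ⟨u, hu, ht⟩

theorem nodup_updateFold (l : List (List String)) :
    ∀ (s : PySem.Set String), s.Nodup →
      (l.foldl (fun s topics => PySem.Set.update s (PySem.Set.ofList topics)) s).Nodup := by
  induction l with
  | nil => intro s hs; simpa using hs
  | cons ts l ih => intro s hs; exact ih _ (PySem.Set.nodup_update _ _ hs)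

-- max?/min? with identity key depend only on membership
theorem max?_congr_mem (l₁ l₂ : List Int) (hm : ∀ x, x ∈ l₁ ↔ x ∈ l₂) (hne : l₁ ≠ []) :
    PySem.List.max? l₁ (fun v => v) = PySem.List.max? l₂ (fun v => v) := by
  have hne₂ : l₂ ≠ [] := by
    cases l₁ with
    | nil => exact absurd rfl hne
    | cons a t => intro h; subst h; simpa using (hm a).mp (by simp)
  obtain ⟨m₁, h₁⟩ : ∃ m, PySem.List.max? l₁ (fun v => v) = some m := by
    cases h : PySem.List.max? l₁ (fun v => v) with
    | none => exact absurd ((PySem.List.max?_eq_none_iff _ _).mp h) hne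
    | some m => exact ⟨m, rfl⟩
  obtain ⟨m₂, h₂⟩ : ∃ m, PySem.List.max? l₂ (fun v => v) = some m := by
    cases h : PySem.List.max? l₂ (fun v => v) with
    | none => exact absurd ((PySem.List.max?_eq_none_iff _ _).mp h) hne₂
    | some m => exact ⟨m, rfl⟩
  rw [h₁, h₂]
  have le₁ : m₁ ≤ m₂ := PySem.List.max?_isMax h₂ m₁ ((hm m₁).mp (PySem.List.max?_mem h₁))
  have le₂ : m₂ ≤ m₁ := PySem.List.max?_isMax h₁ m₂ ((hm m₂).mpr (PySem.List.max?_mem h₂))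
  exact congrArg some (le_antisymm le₁ le₂)

theorem min?_congr_mem (l₁ l₂ : List Int) (hm : ∀ x, x ∈ l₁ ↔ x ∈ l₂) (hne : l₁ ≠ []) :
    PySem.List.min? l₁ (fun v => v) = PySem.List.min? l₂ (fun v => v) := by
  have hne₂ : l₂ ≠ [] := by
    cases l₁ with
    | nil => exact absurd rfl hne
    | cons a t => intro h; subst h; simpa using (hm a).mp (by simp)
  obtain ⟨m₁, h₁⟩ : ∃ m, PySem.List.min? l₁ (fun v => v) = some m := by
    cases h : PySem.List.min? l₁ (fun v => v) with
    | none => exact absurd ((PySem.List.min?_eq_none_iff _ _).mp h) hne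
    | some m => exact ⟨m, rfl⟩
  obtain ⟨m₂, h₂⟩ : ∃ m, PySem.List.min? l₂ (fun v => v) = some m := by
    cases h : PySem.List.min? l₂ (fun v => v) with
    | none => exact absurd ((PySem.List.min?_eq_none_iff _ _).mp h) hne₂
    | some m => exact ⟨m, rfl⟩
  rw [h₁, h₂]
  have le₁ : m₂ ≤ m₁ := PySem.List.min?_isMin h₂ m₁ ((hm m₁).mp (PySem.List.min?_mem h₁))
  have le₂ : m₁ ≤ m₂ := PySem.List.min?_isMin h₁ m₂ ((hm m₂).mpr (PySem.List.min?_mem h₂))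
  exact congrArg some (le_antisymm le₂ le₁)

-- length of A's tie-collecting loop is a countP
theorem append_if_length (c : Int) (l : List (String × Int)) :
    (l.foldl (fun acc kv => if kv.2 = c then acc ++ [kv.1] else acc) ([] : List String)).length
      = l.countP (fun kv => decide (kv.2 = c)) := by
  rw [show (fun (acc : List String) (kv : String × Int) => if kv.2 = c then acc ++ [kv.1] else acc)
        = (fun acc kv => if (fun kv : String × Int => decide (kv.2 = c)) kv = true
            then acc ++ [(fun kv : String × Int => kv.1) kv] else acc) from by
      funext acc kv; simp]
  rw [PySem.List.foldl_append_if]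
  simp [List.countP_eq_length_filter]

-- ===== VERDICT (by name: the statement is the Claim_ definition above) =====
theorem trending_spec : Claim_equal_trending := by
  intro sts hdom hpre
  unfold Spec_trending
  clear hdom
  cases sts with
  | nil => exact absurd rfl hpre
  | cons first rest =>
    -- notation
    set l := first :: rest with hl
    set nc := pvNC l with hnc
    -- the two key lists
    set K : PySem.Set String :=
      l.foldl (fun s topics => s.union (PySem.Set.ofList topics)) (PySem.Set.ofList first) with hK
    set K' : PySem.Set String :=
      l.foldl (fun s topics => PySem.Set.update s (PySem.Set.ofList topics)) [] with hK'
    have hKnodup : K.Nodup := nodup_unionFold l _ (PySem.Set.nodup_ofList first)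
    have hK'nodup : K'.Nodup := nodup_updateFold l [] (by simp)
    have hKmem : ∀ t, t ∈ K ↔ ∃ ts ∈ l, t ∈ ts := by
      intro t
      rw [hK, mem_unionFold]
      constructor
      · rintro (h | h)
        · exact ⟨first, by simp [hl], (PySem.Set.mem_ofList first t).mp h⟩
        · exact h
      · exact Or.inr
    have hK'mem : ∀ t, t ∈ K' ↔ ∃ ts ∈ l, t ∈ ts := by
      intro t
      rw [hK', mem_updateFold]
      simp
    have hperm : K.Perm K' :=
      (List.perm_ext_iff_of_nodup hKnodup hK'nodup).mpr (fun t => (hKmem t).trans (hK'mem t).symm)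
    -- nonemptiness
    obtain ⟨t0, ht0⟩ : ∃ t0, t0 ∈ l.flatten := by
      cases h : l.flatten with
      | nil => exact absurd h hpre
      | cons a tl => exact ⟨a, List.mem_cons_self⟩

    have ht0K : t0 ∈ K := (hKmem t0).mpr (List.mem_flatten.mp ht0)
    have ht0K' : t0 ∈ K' := (hK'mem t0).mpr (List.mem_flatten.mp ht0)
    have hKne : K.map nc ≠ [] := by
      intro h; rw [List.map_eq_nil_iff] at h; simp [h] at ht0K
    have hK'ne : K'.map nc ≠ [] := by
      intro h; rw [List.map_eq_nil_iff] at h; simp [h] at ht0K'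
    -- the extrema
    obtain ⟨top, htop⟩ : ∃ m, PySem.List.max? (K.map nc) (fun v => v) = some m := by
      cases h : PySem.List.max? (K.map nc) (fun v => v) with
      | none => exact absurd ((PySem.List.max?_eq_none_iff _ _).mp h) hKne
      | some m => exact ⟨m, rfl⟩
    obtain ⟨bot, hbot⟩ : ∃ m, PySem.List.min? (K.map nc) (fun v => v) = some m := by
      cases h : PySem.List.min? (K.map nc) (fun v => v) with
      | none => exact absurd ((PySem.List.min?_eq_none_iff _ _).mp h) hKne
      | some m => exact ⟨m, rfl⟩
    -- A's count dict
    have hitems : (K.foldl (fun d topic =>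
        l.foldl (fun d topics => if topic ∈ topics then d.insert topic (d.getD topic 0 + 1) else d)
          (d.insert topic 0)) PySem.Dict.empty).items = K.map (fun t => (t, nc t)) :=
      countsA_items l K hKnodup
    have hget : PySem.List.pyGet? l 0 = some first := by
      simp [hl, PySem.List.pyGet?, PySem.List.pyIdx?]
    have hvalsA : (K.foldl (fun d topic =>
        l.foldl (fun d topics => if topic ∈ topics then d.insert topic (d.getD topic 0 + 1) else d)
          (d.insert topic 0)) PySem.Dict.empty).values = K.map nc := by
      simp only [PySem.Dict.values, hitems, List.map_map]
      rfl
    have hA : trending l = ((((K.map (fun t => (t, nc t))).countP (fun kv => decide (kv.2 = top)) : Nat) : Int),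
        (((K.map (fun t => (t, nc t))).countP (fun kv => decide (kv.2 = bot)) : Nat) : Int)) := by
      simp only [trending, hget]
      rw [← hK]
      simp only [hvalsA, hitems, htop, hbot, append_if_length]
    -- B's freq dict
    set F := l.foldl (fun d topics =>
        (PySem.Set.ofList topics).foldl (fun d t => d.insert t (d.getD t 0 + 1)) d)
      (PySem.Dict.empty : PySem.Dict String Int) with hF
    have hFkeys : F.keys = K' := by
      rw [hF, freqB_keys]
      simp only [PySem.Dict.keys_empty]
      exact hK'.symm
    have hFgetD : ∀ t, F.getD t 0 = nc t := by
      intro t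
      rw [hF, freqB_getD]
      simp [hnc]
    have hFvals : F.values = K'.map nc := by
      rw [PySem.Dict.values_eq_map_keys F (hFkeys ▸ hK'nodup) 0, hFkeys]
      exact List.map_congr_left (fun t _ => hFgetD t)
    have hpm : (PySem.List.max? (PySem.Set.ofList (K'.map nc)) (fun v => v)) = some top := by
      rw [max?_congr_mem (PySem.Set.ofList (K'.map nc)) (K.map nc)
        (fun x => by
          rw [PySem.Set.mem_ofList]
          exact ((hperm.map nc).mem_iff (a := x)).symm)
        (by
          intro h
          have := (PySem.Set.mem_ofList (K'.map nc) (nc t0)).mpr (List.mem_map_of_mem ht0K')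
          rw [h] at this
          simp at this)]
      exact htop
    have hpn : (PySem.List.min? (PySem.Set.ofList (K'.map nc)) (fun v => v)) = some bot := by
      rw [min?_congr_mem (PySem.Set.ofList (K'.map nc)) (K.map nc)
        (fun x => by
          rw [PySem.Set.mem_ofList]
          exact ((hperm.map nc).mem_iff (a := x)).symm)
        (by
          intro h
          have := (PySem.Set.mem_ofList (K'.map nc) (nc t0)).mpr (List.mem_map_of_mem ht0K')
          rw [h] at this
          simp at this)]
      exact hbot
    have hB : trending_alt l = (((List.count top (K'.map nc) : Nat) : Int),
        ((List.count bot (K'.map nc) : Nat) : Int)) := by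
      simp only [trending_alt]
      rw [← hF, PySem.Dict.foldl_insert_getD_add_one_eq_counter, hFvals,
        PySem.Dict.keys_counter, hpm, hpn]
      simp [PySem.Dict.getD_counter]
    have hcount : ∀ c : Int,
        ((K.map (fun t => (t, nc t))).countP (fun kv => decide (kv.2 = c)))
          = List.count c (K'.map nc) := by
      intro c
      rw [List.countP_map, List.count_eq_countP, List.countP_map]
      rw [hperm.countP_eq]
      apply List.countP_congr
      intro t _
      simp [Function.comp]
    rw [hA, hB, hcount top, hcount bot]
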